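-- pv_equiv track=rewrite | github.com/Sefaria/Sefaria-Data | sources/calendars/yerushalmi_yomi_calendar/ingest_calendar.py | num_to_gematria
-- ===== SOURCE A (Python) =====
-- def num_to_gematria(number):
--     hebrew_letters = {
--         1: 'א',
--         2: 'ב',
--         3: 'ג',
--         4: 'ד',
--         5: 'ה',
--         6: 'ו',
--         7: 'ז',
--         8: 'ח',
--         9: 'ט',
--         10: 'י',
--         20: 'כ',
--         30: 'ל',
--         40: 'מ',
--         50: 'נ',
--         60: 'ס',
--         70: 'ע',
--         80: 'פ',
--         90: 'צ',
--         100: 'ק',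
--         200: 'ר',
--         300: 'ש',
--         400: 'ת'
--     }
--     result = ''
--     for value, letter in sorted(hebrew_letters.items(), reverse=True):
--         while number >= value:
--             result += letter
--             number -= value
--     result = result.replace('יה', 'טו')
--     result = result.replace('יו', 'טז')
--     return result
-- ===== SOURCE B (Python) =====
-- def num_to_gematria(number):
--     # Place-value decomposition: direct table lookup per decimal digit
--     # instead of a descending greedy subtraction scan; the two irregular
--     # remainders are handled as explicit cases.
--     if number < 1:
--         return ''
--     hundreds, rest = divmod(number, 100)
--     tens, units = divmod(rest, 10)
--     if rest == 15:
--         tail = 'טו'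
--     elif rest == 16:
--         tail = 'טז'
--     else:
--         tail = ['', 'י', 'כ', 'ל', 'מ', 'נ', 'ס', 'ע', 'פ', 'צ'][tens] + \
--                ['', 'א', 'ב', 'ג', 'ד', 'ה', 'ו', 'ז', 'ח', 'ט'][units]
--     return 'ת' * (hundreds // 4) + ['', 'ק', 'ר', 'ש'][hundreds % 4] + tail
-- ===== Notes on version B (the rewrite author's own statement) =====
-- stated objective: alternative
-- what changed: Replaces the descending greedy subtraction scan over the letter values (plus the two string replaces) with a direct place-value decomposition: quotient/remainder per decimal digit, table lookups for units/tens/hundreds, and the two irregular remainders handled as explicit cases instead of post-hoc replaces.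
import Mathlib
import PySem

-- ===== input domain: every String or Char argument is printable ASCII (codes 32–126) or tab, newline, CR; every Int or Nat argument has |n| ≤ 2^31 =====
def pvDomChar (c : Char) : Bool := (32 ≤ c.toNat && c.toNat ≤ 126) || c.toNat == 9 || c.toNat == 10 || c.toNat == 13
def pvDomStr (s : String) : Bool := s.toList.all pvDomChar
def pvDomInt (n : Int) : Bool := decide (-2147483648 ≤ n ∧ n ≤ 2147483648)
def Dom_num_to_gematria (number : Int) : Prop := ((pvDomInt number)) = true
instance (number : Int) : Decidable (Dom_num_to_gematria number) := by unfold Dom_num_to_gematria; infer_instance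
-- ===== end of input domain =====

-- B replaces A's descending greedy subtraction scan with a per-decimal-digit
-- place-value table lookup; equal return value proved on the whole domain.

-- ===== PORT A =====
-- the dict literal hebrew_letters, in insertion order (dict → association list)
def hebrewLetters : List (Int × List Char) :=
  [(1, ['א']), (2, ['ב']), (3, ['ג']), (4, ['ד']), (5, ['ה']), (6, ['ו']), (7, ['ז']),
   (8, ['ח']), (9, ['ט']), (10, ['י']), (20, ['כ']), (30, ['ל']), (40, ['מ']), (50, ['נ']),
   (60, ['ס']), (70, ['ע']), (80, ['פ']), (90, ['צ']), (100, ['ק']), (200, ['ר']),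
   (300, ['ש']), (400, ['ת'])]

-- the inner `while number >= value: result += letter; number -= value` loop;
-- fuel only makes the same computation total (each pass subtracts value ≥ 1,
-- so number.toNat + 1 passes always suffice)
def gemWhile (fuel : Nat) (value : Int) (letter : List Char) (result : List Char)
    (number : Int) : List Char × Int :=
  match fuel with
  | 0 => (result, number)
  | f + 1 =>
    if value ≤ number then gemWhile f value letter (result ++ letter) (number - value)
    else (result, number)

-- one iteration of `for value, letter in …`, carrying the state (result, number)
def gemStep (st : List Char × Int) (p : Int × List Char) : List Char × Int :=
  gemWhile (st.2.toNat + 1) p.1 p.2 st.1 st.2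

def num_to_gematria (number : Int) : String :=
  -- the dict keys are distinct, so Python's tuple comparison in sorted(...) is
  -- decided by the value component alone: sorting on fst is exact here
  let pairs := PySem.List.sorted hebrewLetters (fun x => x.1) true
  let st := pairs.foldl gemStep (([] : List Char), number)
  let r1 := PySem.Chars.replace st.1 ['י', 'ה'] ['ט', 'ו']
  let r2 := PySem.Chars.replace r1 ['י', 'ו'] ['ט', 'ז']
  String.ofList r2

-- ===== PORT B =====
def unitsTable : List (List Char) :=
  [[], ['א'], ['ב'], ['ג'], ['ד'], ['ה'], ['ו'], ['ז'], ['ח'], ['ט']]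
def tensTable : List (List Char) :=
  [[], ['י'], ['כ'], ['ל'], ['מ'], ['נ'], ['ס'], ['ע'], ['פ'], ['צ']]
def hundredsTable : List (List Char) :=
  [[], ['ק'], ['ר'], ['ש']]

def num_to_gematria_alt (number : Int) : String :=
  if number < 1 then "" else
  let hundreds := PySem.Int.floordiv number 100
  let rest := PySem.Int.mod number 100
  let tens := PySem.Int.floordiv rest 10
  let units := PySem.Int.mod rest 10
  let tail : List Char :=
    if rest = 15 then ['ט', 'ו']
    else if rest = 16 then ['ט', 'ז']
    else PySem.List.pyGetD tensTable tens [] ++ PySem.List.pyGetD unitsTable units []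
  String.ofList (List.replicate (PySem.Int.floordiv hundreds 4).toNat 'ת'
    ++ PySem.List.pyGetD hundredsTable (PySem.Int.mod hundreds 4) [] ++ tail)

-- ===== PRECONDITION & SPEC =====
def Spec_num_to_gematria (number : Int) (out : String) : Prop := out = num_to_gematria_alt number
instance (number : Int) (out : String) : Decidable (Spec_num_to_gematria number out) := by unfold Spec_num_to_gematria; infer_instance

-- ===== CLAIM (what is proved, stated in full; the proofs are below) =====
def Claim_equal_num_to_gematria : Prop := ∀ (number : Int), Dom_num_to_gematria number → Spec_num_to_gematria number (num_to_gematria number)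

-- ===== LEMMAS AND PROOFS =====

-- the sorted list, spelled out
lemma sorted_pairs_eq : PySem.List.sorted hebrewLetters (fun x => x.1) true =
    (400, ['ת']) :: [(300, ['ש']), (200, ['ר']), (100, ['ק']), (90, ['צ']), (80, ['פ']),
      (70, ['ע']), (60, ['ס']), (50, ['נ']), (40, ['מ']), (30, ['ל']), (20, ['כ']),
      (10, ['י']), (9, ['ט']), (8, ['ח']), (7, ['ז']), (6, ['ו']), (5, ['ה']), (4, ['ד']),
      (3, ['ג']), (2, ['ב']), (1, ['א'])] := by decide

-- the pairs after (400, ת)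
def restPairs : List (Int × List Char) :=
  [(300, ['ש']), (200, ['ר']), (100, ['ק']), (90, ['צ']), (80, ['פ']), (70, ['ע']),
   (60, ['ס']), (50, ['נ']), (40, ['מ']), (30, ['ל']), (20, ['כ']), (10, ['י']),
   (9, ['ט']), (8, ['ח']), (7, ['ז']), (6, ['ו']), (5, ['ה']), (4, ['ד']),
   (3, ['ג']), (2, ['ב']), (1, ['א'])]

-- what A produces from the remainder r < 400 (everything after the ת-loop)
def coreA (r : Int) : List Char := (restPairs.foldl gemStep ([], r)).1

-- what B produces from the remainder r < 400
def coreB (r : Int) : List Char :=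
  PySem.List.pyGetD hundredsTable (PySem.Int.floordiv r 100) [] ++
  (if PySem.Int.mod r 100 = 15 then ['ט', 'ו']
   else if PySem.Int.mod r 100 = 16 then ['ט', 'ז']
   else PySem.List.pyGetD tensTable (PySem.Int.floordiv (PySem.Int.mod r 100) 10) [] ++
        PySem.List.pyGetD unitsTable (PySem.Int.mod (PySem.Int.mod r 100) 10) [])

lemma gemWhile_skip (f : Nat) (v : Int) (l acc : List Char) (n : Int) (h : n < v) :
    gemWhile f v l acc n = (acc, n) := by
  cases f with
  | zero => rfl
  | succ f => simp [gemWhile, show ¬ (v ≤ n) by omega]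

lemma gemWhile_acc (f : Nat) (v : Int) (l : List Char) :
    ∀ (n : Int) (acc : List Char),
      gemWhile f v l acc n = (acc ++ (gemWhile f v l [] n).1, (gemWhile f v l [] n).2) := by
  induction f with
  | zero => intro n acc; simp [gemWhile]
  | succ f ih =>
    intro n acc
    by_cases h : v ≤ n
    · simp only [gemWhile, if_pos h, List.nil_append]
      rw [ih (n - v) (acc ++ l), ih (n - v) l]
      simp [List.append_assoc]
    · simp [gemWhile, h]

-- the ת-loop: value 400, starting result [], nonneg number, enough fuel
lemma gemWhile_spec400 (l : List Char) :
    ∀ (f : Nat) (n : Int), 0 ≤ n → n < (f : Int) * 400 →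
      gemWhile f 400 l [] n = ((List.replicate (n / 400).toNat l).flatten, n % 400) := by
  intro f
  induction f with
  | zero => intro n h0 hf; omega
  | succ f ih =>
    intro n h0 hf
    by_cases h : (400 : Int) ≤ n
    · simp only [gemWhile, if_pos h]
      rw [gemWhile_acc, ih (n - 400) (by omega) (by push_cast at hf ⊢; omega)]
      have hk : (n / 400).toNat = ((n - 400) / 400).toNat + 1 := by omega
      rw [hk, List.replicate_succ, List.flatten_cons]
      simp only [List.nil_append]
      rw [show (n - 400) % 400 = n % 400 by omega]
    · rw [gemWhile_skip _ _ _ _ _ (by omega)]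
      have h1 : (n / 400).toNat = 0 := by omega
      have h2 : n % 400 = n := by omega
      simp [h1, h2]

-- a number below every remaining value passes through the whole loop unchanged
lemma fold_skip (n : Int) (hn : n ≤ 0) :
    ∀ (ps : List (Int × List Char)), (∀ p ∈ ps, 1 ≤ p.1) →
      ∀ acc, ps.foldl gemStep (acc, n) = (acc, n) := by
  intro ps
  induction ps with
  | nil => intro _ acc; rfl
  | cons p t ih =>
    intro hps acc
    have h1 : 1 ≤ p.1 := hps p (by simp)
    simp only [List.foldl_cons]
    rw [show gemStep (acc, n) p = (acc, n) from gemWhile_skip _ _ _ _ _ (by omega)]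
    exact ih (fun q hq => hps q (by simp [hq])) acc

-- the accumulated result only ever grows on the right
lemma fold_acc (ps : List (Int × List Char)) :
    ∀ (n : Int) (acc : List Char),
      ps.foldl gemStep (acc, n)
        = (acc ++ (ps.foldl gemStep ([], n)).1, (ps.foldl gemStep ([], n)).2) := by
  induction ps with
  | nil => intro n acc; simp
  | cons p t ih =>
    intro n acc
    simp only [List.foldl_cons]
    rcases hw : gemWhile (n.toNat + 1) p.1 p.2 [] n with ⟨w1, w2⟩
    have ha : gemStep (acc, n) p = (acc ++ w1, w2) := by
      have := gemWhile_acc (n.toNat + 1) p.1 p.2 n acc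
      rw [hw] at this; exact this
    have hb : gemStep ([], n) p = (w1, w2) := hw
    rw [ha, hb, ih w2 (acc ++ w1), ih w2 w1]
    simp [List.append_assoc]

-- replace.go: the accumulator is a reversed prefix of the answer
lemma replace_go_acc (old new : List Char) :
    ∀ (f : Nat) (s acc : List Char),
      PySem.Chars.replace.go old new f s acc
        = acc.reverse ++ PySem.Chars.replace.go old new f s [] := by
  intro f
  induction f with
  | zero => intro s acc; simp [PySem.Chars.replace.go]
  | succ f ih =>
    intro s acc
    cases s with
    | nil => simp [PySem.Chars.replace.go]
    | cons c t =>
      simp only [PySem.Chars.replace.go]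
      by_cases h : old.isPrefixOf (c :: t)
      · simp only [if_pos h, List.append_nil]
        rw [ih _ (new.reverse ++ acc), ih _ new.reverse]
        simp [List.append_assoc]
      · simp only [if_neg h, List.append_nil]
        rw [ih _ (c :: acc), ih _ [c]]
        simp [List.append_assoc]

-- replace.go walks over a run of a character the pattern cannot start with
lemma replace_go_run (o c : Char) (os new : List Char) (hoc : o ≠ c) :
    ∀ (k : Nat) (f : Nat) (s acc : List Char),
      PySem.Chars.replace.go (o :: os) new (k + f) (List.replicate k c ++ s) acc
        = PySem.Chars.replace.go (o :: os) new f s (List.replicate k c ++ acc) := by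
  intro k
  induction k with
  | zero => intro f s acc; simp
  | succ k ih =>
    intro f s acc
    have hfuel : k + 1 + f = (k + f) + 1 := by omega
    rw [hfuel, List.replicate_succ, List.cons_append]
    simp only [PySem.Chars.replace.go]
    have hpre : (o :: os).isPrefixOf (c :: (List.replicate k c ++ s)) = false := by
      simp [List.isPrefixOf, hoc]
    simp only [hpre, Bool.false_eq_true, if_false]
    rw [ih f s (c :: acc)]
    congr 1
    rw [show List.replicate k c ++ c :: acc = (List.replicate k c ++ [c]) ++ acc by simp,
        ← List.replicate_succ']
    simp [List.replicate_succ]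

-- str.replace leaves a leading run untouched when the pattern starts elsewhere
lemma replace_run_prefix (o c : Char) (os new : List Char) (hoc : o ≠ c)
    (k : Nat) (s : List Char) :
    PySem.Chars.replace (List.replicate k c ++ s) (o :: os) new
      = List.replicate k c ++ PySem.Chars.replace s (o :: os) new := by
  simp only [PySem.Chars.replace, List.isEmpty_cons, Bool.false_eq_true, if_false]
  rw [List.length_append, List.length_replicate, replace_go_run o c os new hoc,
    List.append_nil, replace_go_acc, List.reverse_replicate]

-- the tail of the loop agrees with B's digit tables on every remainder < 400
set_option maxRecDepth 40000 in
lemma core400 : ∀ m : Fin 400,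
    PySem.Chars.replace (PySem.Chars.replace (coreA (m : Int)) ['י', 'ה'] ['ט', 'ו'])
      ['י', 'ו'] ['ט', 'ז'] = coreB (m : Int) := by decide

-- B, written with the remainder split off the ת-run
lemma alt_eq (n : Int) (hn : 1 ≤ n) :
    num_to_gematria_alt n
      = String.ofList (List.replicate (n / 400).toNat 'ת' ++ coreB (n % 400)) := by
  have h100 : PySem.Int.floordiv n 100 = n / 100 :=
    PySem.Int.floordiv_eq_ediv_of_pos (by norm_num)
  have hm100 : PySem.Int.mod n 100 = n % 100 :=
    PySem.Int.mod_eq_emod_of_pos (by norm_num)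
  simp only [num_to_gematria_alt, if_neg (by omega : ¬ n < 1), h100, hm100,
    PySem.Int.floordiv_eq_ediv_of_pos (by norm_num : (0:Int) < 4),
    PySem.Int.floordiv_eq_ediv_of_pos (by norm_num : (0:Int) < 10),
    PySem.Int.mod_eq_emod_of_pos (by norm_num : (0:Int) < 4),
    PySem.Int.mod_eq_emod_of_pos (by norm_num : (0:Int) < 10)]
  unfold coreB
  simp only [PySem.Int.floordiv_eq_ediv_of_pos (by norm_num : (0:Int) < 100),
    PySem.Int.floordiv_eq_ediv_of_pos (by norm_num : (0:Int) < 10),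
    PySem.Int.mod_eq_emod_of_pos (by norm_num : (0:Int) < 100),
    PySem.Int.mod_eq_emod_of_pos (by norm_num : (0:Int) < 10)]
  rw [show n / 100 / 4 = n / 400 by omega,
      show n / 100 % 4 = n % 400 / 100 by omega,
      show n % 100 = n % 400 % 100 by omega]
  simp [List.append_assoc]

-- ===== VERDICT (by name: the statement is the Claim_ definition above) =====
theorem num_to_gematria_spec : Claim_equal_num_to_gematria := by
  intro n _
  unfold Spec_num_to_gematria num_to_gematria
  dsimp only
  rw [sorted_pairs_eq]
  by_cases hn : n < 1
  · -- number < 1: the loop never fires and both sides return ""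
    rw [fold_skip n (by omega) _ (by decide) []]
    simp only [num_to_gematria_alt, if_pos hn]
    rfl
  · -- number ≥ 1: split off the ת-run, then compare the < 400 tail pointwise
    rw [show ((400, ['ת']) :: [(300, ['ש']), (200, ['ר']), (100, ['ק']), (90, ['צ']), (80, ['פ']),
      (70, ['ע']), (60, ['ס']), (50, ['נ']), (40, ['מ']), (30, ['ל']), (20, ['כ']),
      (10, ['י']), (9, ['ט']), (8, ['ח']), (7, ['ז']), (6, ['ו']), (5, ['ה']), (4, ['ד']),
      (3, ['ג']), (2, ['ב']), (1, ['א'])] : List (Int × List Char))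
        = (400, ['ת']) :: restPairs from rfl]
    simp only [List.foldl_cons]
    have hstep : gemStep ([], n) (400, ['ת'])
        = (List.replicate (n / 400).toNat 'ת', n % 400) := by
      unfold gemStep
      rw [gemWhile_spec400 ['ת'] (n.toNat + 1) n (by omega) (by push_cast; omega)]
      rw [List.flatten_replicate_singleton]
    rw [hstep, fold_acc]
    have hr0 : 0 ≤ n % 400 := by omega
    have hr1 : n % 400 < 400 := by omega
    have hco : coreA (n % 400) = (restPairs.foldl gemStep ([], n % 400)).1 := rfl
    rw [← hco]
    rw [replace_run_prefix 'י' 'ת' ['ה'] ['ט', 'ו'] (by decide),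
        replace_run_prefix 'י' 'ת' ['ו'] ['ט', 'ז'] (by decide)]
    have hm : ((⟨(n % 400).toNat, by omega⟩ : Fin 400) : Int) = n % 400 := by
      simp; omega
    have := core400 ⟨(n % 400).toNat, by omega⟩
    rw [hm] at this
    rw [this, alt_eq n (by omega)]
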